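-- pv_equiv track=rewrite | github.com/sanjayravichander/MISRA_GENAI_SYSTEM | data/knowledge/processed_01/segment_guidelines.py | _normalized_page_lines
-- ===== SOURCE A (Python) =====
-- from typing import Dict, List, Optional
--
-- def _normalized_page_lines(page: Dict) -> List[str]:
--     text = page.get("cleaned_text", "")
--     lines = [line.strip() for line in text.splitlines()]
--     normalized: List[str] = []
--     previous_blank = False
--     for line in lines:
--         if not line:
--             if not previous_blank:
--                 normalized.append("")
--             previous_blank = True
--             continue
--         previous_blank = False
--         normalized.append(line)
--     return normalized
-- ===== SOURCE B (Python) =====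
-- from itertools import groupby
-- from typing import Dict, List
--
-- def _normalized_page_lines(page: Dict) -> List[str]:
--     lines = [line.strip() for line in page.get("cleaned_text", "").splitlines()]
--     out: List[str] = []
--     for blank, group in groupby(lines, key=lambda s: not s):
--         if blank:
--             out.append("")
--         else:
--             out.extend(group)
--     return out
-- ===== Notes on version B (the rewrite author's own statement) =====
-- stated objective: idiomatic
-- what changed: Replaces the previous_blank flag loop by itertools.groupby on blankness: each blank run contributes one empty string, each non-blank run is extended wholesale.
import Mathlib
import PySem

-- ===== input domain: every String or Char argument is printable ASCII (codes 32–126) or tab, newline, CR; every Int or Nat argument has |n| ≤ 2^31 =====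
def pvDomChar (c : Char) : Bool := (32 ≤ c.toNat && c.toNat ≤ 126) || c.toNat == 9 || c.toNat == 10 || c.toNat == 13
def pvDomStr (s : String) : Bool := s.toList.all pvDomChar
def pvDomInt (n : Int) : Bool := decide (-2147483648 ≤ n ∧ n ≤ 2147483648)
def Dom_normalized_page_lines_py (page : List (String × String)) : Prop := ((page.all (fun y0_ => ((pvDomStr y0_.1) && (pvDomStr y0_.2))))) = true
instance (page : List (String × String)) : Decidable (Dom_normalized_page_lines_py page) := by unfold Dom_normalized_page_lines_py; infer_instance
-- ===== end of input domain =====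

-- B replaces A's previous_blank-flag loop by a groupby-on-blankness decomposition (same cost; objective: idiomatic).

-- ===== PORT A =====
-- transliteration of A: strip each split line, then a single pass with a previous_blank flag
def normalized_page_lines_py (page : List (String × String)) : List String :=
  let text := (PySem.Dict.ofList page).getD "cleaned_text" ""
  let lines := (PySem.Str.splitlines text).map PySem.Str.strip
  (lines.foldl (fun (st : List String × Bool) line =>
      if line = "" then
        (if st.2 then st.1 else st.1 ++ [""], true)
      else
        (st.1 ++ [line], false)) ([], false)).1

-- ===== PORT B =====
-- transliteration of B's groupby loop: consume maximal runs — a blank run yields one "",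
-- a non-blank run is appended wholesale (takeWhile/dropWhile = one groupby group)
def nplGroups : List String → List String
  | [] => []
  | l :: ls =>
    if l = "" then
      "" :: nplGroups (ls.dropWhile (fun s => s == ""))
    else
      (l :: ls.takeWhile (fun s => !(s == ""))) ++ nplGroups (ls.dropWhile (fun s => !(s == "")))
termination_by l => l.length
decreasing_by
  · exact Nat.lt_succ_of_le (List.length_dropWhile_le _ _)
  · exact Nat.lt_succ_of_le (List.length_dropWhile_le _ _)

def normalized_page_lines_py_alt (page : List (String × String)) : List String :=
  let lines := (PySem.Str.splitlines ((PySem.Dict.ofList page).getD "cleaned_text" "")).map PySem.Str.strip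
  nplGroups lines

-- ===== PRECONDITION & SPEC =====
def Spec_normalized_page_lines_py (page : List (String × String)) (out : List String) : Prop := out = normalized_page_lines_py_alt page
instance (page : List (String × String)) (out : List String) : Decidable (Spec_normalized_page_lines_py page out) := by unfold Spec_normalized_page_lines_py; infer_instance

-- ===== CLAIM (what is proved, stated in full; the proofs are below) =====
def Claim_equal_normalized_page_lines_py : Prop := ∀ (page : List (String × String)), Dom_normalized_page_lines_py page → Spec_normalized_page_lines_py page (normalized_page_lines_py page)

-- ===== LEMMAS AND PROOFS =====

-- A's loop as structural recursion on the remaining lines, carrying only previous_blank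
def loopA (prev : Bool) : List String → List String
  | [] => []
  | l :: ls =>
    if l = "" then
      (if prev then loopA true ls else "" :: loopA true ls)
    else
      l :: loopA false ls

theorem foldl_fst (lines : List String) (acc : List String) (prev : Bool) :
    (lines.foldl (fun (st : List String × Bool) line =>
      if line = "" then
        (if st.2 then st.1 else st.1 ++ [""], true)
      else
        (st.1 ++ [line], false)) (acc, prev)).1 = acc ++ loopA prev lines := by
  induction lines generalizing acc prev with
  | nil => simp [loopA]
  | cons l ls ih =>
    by_cases h : l = "" <;> cases prev <;> simp [loopA, h, ih]

theorem loopA_eq_nplGroups (l : List String) :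
    loopA false l = nplGroups l ∧
    loopA true l = nplGroups (l.dropWhile (fun s => s == "")) ∧
    loopA false l = l.takeWhile (fun s => !(s == "")) ++ nplGroups (l.dropWhile (fun s => !(s == ""))) := by
  induction l with
  | nil => simp [loopA, nplGroups]
  | cons l ls ih =>
    obtain ⟨ih1, ih2, ih3⟩ := ih
    by_cases h : l = ""
    · subst h
      refine ⟨?_, ?_, ?_⟩ <;>
        simp [loopA, nplGroups, List.dropWhile, List.takeWhile, ih2]
    · have hb : (l == "") = false := by simpa using h
      refine ⟨?_, ?_, ?_⟩ <;>
        simp [loopA, nplGroups, List.dropWhile, List.takeWhile, h, hb, ih3]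

-- ===== VERDICT (by name: the statement is the Claim_ definition above) =====
theorem normalized_page_lines_py_spec : Claim_equal_normalized_page_lines_py := by
  intro page _
  unfold Spec_normalized_page_lines_py normalized_page_lines_py normalized_page_lines_py_alt
  rw [foldl_fst]
  simpa using (loopA_eq_nplGroups _).1
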